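-- pv_equiv track=rewrite | github.com/sebunger/mercurial | contrib/packaging/hgpackaging/util.py | normalize_windows_version
-- ===== SOURCE A (Python) =====
-- def normalize_windows_version(version):
--     """Normalize Mercurial version string so WiX/Inno accepts it.
--
--     Version strings have to be numeric ``A.B.C[.D]`` to conform with MSI's
--     requirements.
--
--     We normalize RC version or the commit count to a 4th version component.
--     We store this in the 4th component because ``A.B.C`` releases do occur
--     and we want an e.g. ``5.3rc0`` version to be semantically less than a
--     ``5.3.1rc2`` version. This requires always reserving the 3rd version
--     component for the point release and the ``X.YrcN`` release is always
--     point release 0.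
--
--     In the case of an RC and presence of ``+`` suffix data, we can't use both
--     because the version format is limited to 4 components. We choose to use
--     RC and throw away the commit count in the suffix. This means we could
--     produce multiple installers with the same normalized version string.
--
--     >>> normalize_windows_version("5.3")
--     '5.3.0'
--
--     >>> normalize_windows_version("5.3rc0")
--     '5.3.0.0'
--
--     >>> normalize_windows_version("5.3rc1")
--     '5.3.0.1'
--
--     >>> normalize_windows_version("5.3rc1+2-abcdef")
--     '5.3.0.1'
--
--     >>> normalize_windows_version("5.3+2-abcdef")
--     '5.3.0.2'
--     """
--     if '+' in version:
--         version, extra = version.split('+', 1)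
--     else:
--         extra = None
--
--     # 4.9rc0
--     if version[:-1].endswith('rc'):
--         rc = int(version[-1:])
--         version = version[:-3]
--     else:
--         rc = None
--
--     # Ensure we have at least X.Y version components.
--     versions = [int(v) for v in version.split('.')]
--     while len(versions) < 3:
--         versions.append(0)
--
--     if len(versions) < 4:
--         if rc is not None:
--             versions.append(rc)
--         elif extra:
--             # <commit count>-<hash>+<date>
--             versions.append(int(extra.split('-')[0]))
--
--     return '.'.join('%d' % x for x in versions[0:4])
-- ===== SOURCE B (Python) =====
-- def normalize_windows_version(version):
--     """Normalize Mercurial version string so WiX/Inno accepts it.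
--
--     Alternative decomposition: partition off the plus-sign suffix, detect the
--     rc digit, then emit the up-to-four output fields directly by a
--     recursive renderer that interleaves the dots as it goes -- no
--     padding list, no append, no truncation, no join.
--     """
--     core, _, extra = version.partition('+')
--     fourth = None
--     if core[-3:-1] == 'rc':
--         fourth = int(core[-1])
--         core = core[:-3]
--     return _render(core.split('.'), 0, fourth, extra)
--
--
-- def _render(comps, i, fourth, extra):
--     # Field i of the output: a parsed component, a zero pad (up to the
--     # third field), or the fourth slot (rc digit / commit count / nothing).
--     if i == 4:
--         return ''
--     if i < len(comps):
--         rest = _render(comps, i + 1, fourth, extra)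
--         head = '%d' % int(comps[i])
--     elif i < 3:
--         rest = _render(comps, i + 1, fourth, extra)
--         head = '0'
--     elif fourth is not None:
--         return '%d' % fourth
--     elif extra:
--         return '%d' % int(extra.split('-')[0])
--     else:
--         return ''
--     return head if rest == '' else head + '.' + rest
-- ===== Notes on version B (the rewrite author's own statement) =====
-- stated objective: alternative
-- what changed: B partitions off the plus-sign suffix and then replaces A's whole list pipeline (pad-to-three while loop, conditional fourth-component append, truncate to four, join) with a recursive field renderer that emits each of the up-to-four output fields directly -- parsed component, zero pad, or fourth slot (rc digit / commit count) -- interleaving the dots as it recurses, so no padded list is ever built, appended to, truncated or joined.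
import Mathlib
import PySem

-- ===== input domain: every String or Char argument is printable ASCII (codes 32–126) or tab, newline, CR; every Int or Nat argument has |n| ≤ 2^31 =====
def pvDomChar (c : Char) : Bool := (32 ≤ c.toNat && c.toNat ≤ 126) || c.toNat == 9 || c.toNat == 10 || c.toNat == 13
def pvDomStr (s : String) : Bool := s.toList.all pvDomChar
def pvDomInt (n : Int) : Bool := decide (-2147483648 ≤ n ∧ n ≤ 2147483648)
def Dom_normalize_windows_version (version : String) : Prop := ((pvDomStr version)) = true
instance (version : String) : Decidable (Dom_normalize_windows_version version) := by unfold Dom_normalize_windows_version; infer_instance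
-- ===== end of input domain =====

-- B replaces A's pad-while/append/truncate/join list pipeline with a partition of the plus-sign suffix
-- followed by a recursive field renderer that emits each of the up-to-four output fields (component,
-- zero pad, or fourth slot) and interleaves the dots directly (objective: alternative decomposition).


-- ===== PORT A =====
-- while len(versions) < 3: versions.append(0)
def pvPadWhile (xs : List Int) : List Int :=
  if xs.length < 3 then pvPadWhile (xs ++ [0]) else xs
termination_by 3 - xs.length
decreasing_by simp; omega

def normalize_windows_version (version : String) : String :=
  -- if '+' in version: version, extra = version.split('+', 1)  else: extra = None
  let st :=
    if PySem.Str.isIn "+" version then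
      match PySem.Str.splitMax? version "+" 1 with
      | some (v :: e :: _) => (v, some e)
      | _ => (version, none)        -- unreachable: split('+', 1) yields two pieces when '+' occurs
    else (version, (none : Option String))
  let ver := st.1
  let extra := st.2
  -- if version[:-1].endswith('rc'): rc = int(version[-1:]); version = version[:-3]  else: rc = None
  let st2 :=
    if PySem.Str.endswith (PySem.Str.slice ver none (some (-1))) "rc" then
      (some ((PySem.Int.ofStr? (PySem.Str.slice ver (some (-1)) none)).getD 0),
       PySem.Str.slice ver none (some (-3)))
    else ((none : Option Int), ver)
  let rc := st2.1
  let ver2 := st2.2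
  -- versions = [int(v) for v in version.split('.')]   (int() raises outside Pre_; .getD 0 is dead there)
  let versions : List Int :=
    ((PySem.Str.split? ver2 ".").getD []).map (fun v => (PySem.Int.ofStr? v).getD 0)
  let versions := pvPadWhile versions
  -- if len(versions) < 4: append rc, elif extra: append int(extra.split('-')[0])
  let versions :=
    if versions.length < 4 then
      match rc with
      | some r => versions ++ [r]
      | none =>
        match extra with
        | some e =>
          if e ≠ "" then
            versions ++ [(PySem.Int.ofStr? (((PySem.Str.split? e "-").getD []).headD "")).getD 0]
          else versions
        | none => versions
    else versions
  -- '.'.join('%d' % x for x in versions[0:4])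
  PySem.Str.join "." ((PySem.List.slice versions (some 0) (some 4)).map PySem.Int.toStr)

-- ===== PORT B =====
-- _render(comps, i, fourth, extra): field i of the output — a parsed component, a zero pad
-- (up to the third field), or the fourth slot — with the dots interleaved as it recurses.
-- (Worked on List Char, the PySem representation of strings; int() of a component is
-- PySem.Int.ofChars?, dead .getD 0 where Python raises.)
def pvRender (comps : List (List Char)) (i : Nat) (fourth : Option Int) (extra : List Char) : List Char :=
  if i = 4 then []
  else if h : i < comps.length then
    let rest := pvRender comps (i + 1) fourth extra
    let head := PySem.Int.toChars ((PySem.Int.ofChars? comps[i]).getD 0)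
    if rest = [] then head else head ++ '.' :: rest
  else if h3 : i < 3 then
    let rest := pvRender comps (i + 1) fourth extra
    if rest = [] then ['0'] else '0' :: '.' :: rest
  else
    match fourth with
    | some f => PySem.Int.toChars f
    | none =>
      if extra ≠ [] then
        PySem.Int.toChars ((PySem.Int.ofChars? (((PySem.Chars.split? extra ['-']).getD []).headD [])).getD 0)
      else []
termination_by comps.length + 4 - i
decreasing_by all_goals omega

def normalize_windows_version_alt (version : String) : String :=
  let l := version.toList
  -- core, _, extra = version.partition('+')   (hand port of str.partition for the one-char
  -- separator, exact: core = chars before the first '+', extra = chars after it, '' if absent)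
  let core0 := l.takeWhile (· ≠ '+')
  let extra := if '+' ∈ l then l.drop (core0.length + 1) else []
  -- if core[-3:-1] == 'rc': fourth = int(core[-1]); core = core[:-3]
  let st :=
    if PySem.Chars.slice core0 (some (-3)) (some (-1)) = ['r', 'c'] then
      (some ((PySem.Int.ofChars? [(PySem.Chars.pyGet? core0 (-1)).getD ' ']).getD 0),
       PySem.Chars.slice core0 none (some (-3)))
    else ((none : Option Int), core0)
  -- return _render(core.split('.'), 0, fourth, extra)
  String.ofList (pvRender ((PySem.Chars.split? st.2 ['.']).getD []) 0 st.1 extra)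

-- ===== PRECONDITION & SPEC =====
-- Pre_ excludes exactly the inputs on which A raises ValueError: some dotted version component
-- (after stripping a recognized release-candidate suffix), the release-candidate digit, or the
-- needed leading commit-count field of the suffix data is not a valid int() literal.
def Pre_normalize_windows_version (version : String) : Prop :=
  let parts := (PySem.Str.splitMax? version "+" 1).getD [version]
  let core0 := parts.headD ""
  let extra := if parts.length = 2 then parts.getD 1 "" else ""
  let hasRc := PySem.Str.slice core0 (some (-3)) (some (-1)) = "rc"
  let core := if hasRc then PySem.Str.slice core0 none (some (-3)) else core0
  let comps := (PySem.Str.split? core ".").getD []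
  (hasRc → (PySem.Int.ofStr? (PySem.Str.slice core0 (some (-1)) none)).isSome)
  ∧ (∀ c ∈ comps, (PySem.Int.ofStr? c).isSome)
  ∧ ((¬ hasRc ∧ extra ≠ "" ∧ comps.length < 4) →
      (PySem.Int.ofStr? (((PySem.Str.split? extra "-").getD []).headD "")).isSome)
instance (version : String) : Decidable (Pre_normalize_windows_version version) := by
  unfold Pre_normalize_windows_version; infer_instance

def pvWitness_normalize_windows_version : String := "5.3rc1+2-abcdef"

def Spec_normalize_windows_version (version : String) (out : String) : Prop := out = normalize_windows_version_alt version
instance (version : String) (out : String) : Decidable (Spec_normalize_windows_version version out) := by unfold Spec_normalize_windows_version; infer_instance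

-- ===== CLAIM (what is proved, stated in full; the proofs are below) =====
def Claim_equal_normalize_windows_version : Prop := ∀ (version : String), Dom_normalize_windows_version version → Pre_normalize_windows_version version → Spec_normalize_windows_version version (normalize_windows_version version)


-- ===== LEMMAS AND PROOFS =====

lemma pv_go0 (fuel : Nat) (l : List Char) (acc : List (List Char)) :
    PySem.Chars.splitOnMax.go ['+'] fuel 0 l [] acc = acc.reverse ++ [l] := by
  cases fuel with
  | zero => simp [PySem.Chars.splitOnMax.go]
  | succ f => cases l <;> simp [PySem.Chars.splitOnMax.go]

lemma pv_go1 (fuel : Nat) (l cur : List Char) (acc : List (List Char)) (h : l.length < fuel) :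
    PySem.Chars.splitOnMax.go ['+'] fuel 1 l cur acc =
      if '+' ∈ l then
        acc.reverse ++ [cur.reverse ++ l.takeWhile (· ≠ '+'),
                        l.drop ((l.takeWhile (· ≠ '+')).length + 1)]
      else acc.reverse ++ [cur.reverse ++ l] := by
  induction fuel generalizing l cur acc with
  | zero => omega
  | succ f ih =>
    cases l with
    | nil => simp [PySem.Chars.splitOnMax.go]
    | cons c rest =>
      have hc' : ∀ (_ : ¬ c = '+'), ¬ ('+' = c) := fun hc h => hc h.symm
      by_cases hc : c = '+'
      · subst hc
        simp only [PySem.Chars.splitOnMax.go, List.isPrefixOf, Bool.and_true, beq_self_eq_true,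
          if_true]
        rw [pv_go0]
        simp [List.takeWhile]
      · have hp : (['+'] : List Char).isPrefixOf (c :: rest) = false := by
          simp [List.isPrefixOf]; exact hc' hc
        simp only [PySem.Chars.splitOnMax.go, hp, Bool.false_eq_true, if_false]
        rw [ih rest (c :: cur) acc (by simpa using Nat.lt_of_succ_lt_succ h)]
        by_cases hm : '+' ∈ rest <;> simp [hc, hm, hc' hc]

-- closed form of s.split('+', 1)
lemma pv_splitMax1 (s : List Char) :
    PySem.Chars.splitMax? s ['+'] 1 =
      some (if '+' ∈ s then
        [s.takeWhile (· ≠ '+'), s.drop ((s.takeWhile (· ≠ '+')).length + 1)]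
      else [s]) := by
  rw [PySem.Chars.splitMax?]
  simp [PySem.Chars.splitOnMax, pv_go1 (s.length + 1) s [] [] (by omega)]

-- the same, at String level
lemma pv_split_str (version : String) (h : '+' ∈ version.toList) :
    ∃ x y, PySem.Str.splitMax? version "+" 1 = some [x, y] ∧
      x.toList = version.toList.takeWhile (· ≠ '+') ∧
      y.toList = version.toList.drop ((version.toList.takeWhile (· ≠ '+')).length + 1) := by
  have hsm := PySem.Str.splitMax?_map version "+" 1
  rw [show ("+" : String).toList = ['+'] from rfl, pv_splitMax1, if_pos h] at hsm
  cases ro : PySem.Str.splitMax? version "+" 1 with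
  | none => rw [ro] at hsm; simp at hsm
  | some L =>
    rw [ro] at hsm
    rcases L with _ | ⟨x, _ | ⟨y, _ | _⟩⟩ <;> simp at hsm
    exact ⟨x, y, rfl, by simp [hsm.1], by simp [hsm.2]⟩

lemma pv_split_str_no (version : String) (h : ¬ '+' ∈ version.toList) :
    PySem.Str.splitMax? version "+" 1 = some [version] := by
  have hsm := PySem.Str.splitMax?_map version "+" 1
  rw [show ("+" : String).toList = ['+'] from rfl, pv_splitMax1, if_neg h] at hsm
  cases ro : PySem.Str.splitMax? version "+" 1 with
  | none => rw [ro] at hsm; simp at hsm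
  | some L =>
    rw [ro] at hsm
    rcases L with _ | ⟨x, _ | _⟩ <;> simp at hsm
    rw [String.toList_inj.mp hsm]

lemma pv_isIn_plus (version : String) :
    PySem.Str.isIn "+" version = true ↔ '+' ∈ version.toList := by
  rw [PySem.Str.isIn_iff_infix]
  exact List.singleton_infix_iff '+' version.toList

lemma pv_suffix_iff_drop (p t : List Char) :
    p <:+ t ↔ t.drop (t.length - p.length) = p := by
  constructor
  · rintro ⟨u, rfl⟩
    simp
  · intro h
    exact ⟨t.take (t.length - p.length),
      by conv_rhs => rw [← List.take_append_drop (t.length - p.length) t, h]⟩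

lemma pv_clamp_m1 (n : Nat) : PySem.List.clampIdx n (-1) = n - 1 := by
  simp only [PySem.List.clampIdx]; split_ifs <;> omega

lemma pv_clamp_m3 (n : Nat) : PySem.List.clampIdx n (-3) = n - 3 := by
  simp only [PySem.List.clampIdx]; split_ifs <;> omega

-- s[-3:-1] in closed form
lemma pv_slice_m3_m1 (s : List Char) :
    PySem.List.slice s (some (-3)) (some (-1)) = s.dropLast.drop (s.length - 3) := by
  show List.take (PySem.List.clampIdx s.length (-1) - PySem.List.clampIdx s.length (-3))
      (List.drop (PySem.List.clampIdx s.length (-3)) s) = _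
  rw [pv_clamp_m1, pv_clamp_m3, List.dropLast_eq_take, List.drop_take]

-- s[-1:] in closed form
lemma pv_slice_m1_none (s : List Char) :
    PySem.List.slice s (some (-1)) none = s.drop (s.length - 1) := by
  show List.take (s.length - PySem.List.clampIdx s.length (-1))
      (List.drop (PySem.List.clampIdx s.length (-1)) s) = _
  rw [pv_clamp_m1]
  exact List.take_of_length_le (by simp)

lemma pv_drop_last : ∀ (s : List Char) (h : s ≠ []), s.drop (s.length - 1) = [s.getLast h]
  | [_], _ => rfl
  | a :: b :: t, _ => by
    have := pv_drop_last (b :: t) (by simp)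
    simpa [List.getLast_cons] using this

-- A's rc test (version[:-1].endswith('rc')) and B's (version[-3:-1] == 'rc') agree
lemma pv_rc_guard (s : List Char) :
    (['r', 'c'] <:+ s.dropLast) ↔ PySem.List.slice s (some (-3)) (some (-1)) = ['r', 'c'] := by
  rw [pv_slice_m3_m1, pv_suffix_iff_drop]
  have h2 : s.dropLast.length - (['r', 'c'] : List Char).length = s.length - 3 := by
    rw [List.length_dropLast]; simp; omega
  rw [h2]

lemma pv_padWhile_step (xs : List Int) (h : xs.length < 3) :
    pvPadWhile xs = pvPadWhile (xs ++ [0]) := by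
  rw [pvPadWhile]; exact if_pos h

lemma pv_padWhile_eq (xs : List Int) :
    pvPadWhile xs = xs ++ List.replicate (3 - xs.length) 0 := by
  rcases xs with _ | ⟨a, t⟩
  · rw [pv_padWhile_step _ (by simp), pv_padWhile_step _ (by simp),
      pv_padWhile_step _ (by simp), pvPadWhile]
    norm_num [List.replicate]
  · rcases t with _ | ⟨b, u⟩
    · rw [pv_padWhile_step _ (by simp), pv_padWhile_step _ (by simp), pvPadWhile]
      norm_num [List.replicate]
    · rcases u with _ | ⟨c, v⟩
      · rw [pv_padWhile_step _ (by simp), pvPadWhile]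
        norm_num [List.replicate]
      · rw [pvPadWhile, if_neg (by simp)]
        have h0 : 3 - (a :: b :: c :: v).length = 0 := by simp
        rw [h0]
        simp

lemma pv_slice_0_4 (xs : List Int) :
    PySem.List.slice xs (some 0) (some 4) = xs.take 4 := by
  show List.take (PySem.List.clampIdx xs.length 4 - PySem.List.clampIdx xs.length 0)
      (List.drop (PySem.List.clampIdx xs.length 0) xs) = _
  have h0 : PySem.List.clampIdx xs.length 0 = 0 := by
    simp only [PySem.List.clampIdx]; split_ifs <;> omega
  have h4 : PySem.List.clampIdx xs.length 4 = min 4 xs.length := by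
    simp only [PySem.List.clampIdx]; split_ifs <;> omega
  rw [h0, h4, Nat.sub_zero, List.drop_zero]
  conv_lhs => rw [show xs = xs.take xs.length from (List.take_length).symm]
  rw [List.take_take]
  simp [Nat.min_comm]

-- the int list A's pipeline produces, in closed form (the shape B's renderer walks)
def pvFourth (fourth : Option Int) (extra : List Char) : List Int :=
  match fourth with
  | some r => [r]
  | none =>
    if extra ≠ [] then
      [(PySem.Int.ofChars? (((PySem.Chars.split? extra ['-']).getD []).headD [])).getD 0]
    else []

def pvF (comps : List (List Char)) (fourth : Option Int) (extra : List Char) : List Int :=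
  if 4 ≤ comps.length then (comps.map (fun c => (PySem.Int.ofChars? c).getD 0)).take 4
  else comps.map (fun c => (PySem.Int.ofChars? c).getD 0) ++
    List.replicate (3 - comps.length) 0 ++ pvFourth fourth extra

lemma pv_fourth_len (fourth : Option Int) (extra : List Char) :
    (pvFourth fourth extra).length ≤ 1 := by
  unfold pvFourth
  cases fourth <;> simp
  split_ifs <;> simp

lemma pv_F_len (comps : List (List Char)) (fourth : Option Int) (extra : List Char) :
    (pvF comps fourth extra).length ≤ 4 := by
  unfold pvF
  have := pv_fourth_len fourth extra
  split_ifs with h4 <;>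
    simp only [List.length_take, List.length_map, List.length_append,
      List.length_replicate] <;> omega

lemma pv_toChars_ne_nil (n : Int) : PySem.Int.toChars n ≠ [] := by
  unfold PySem.Int.toChars
  split_ifs
  · simp
  · have h10 : 0 < (Nat.toDigits 10 n.toNat).length := Nat.length_toDigits_pos
    intro h
    rw [h] at h10
    simp at h10

lemma pv_join_nil_iff (l : List Int) :
    PySem.Chars.join ['.'] (l.map PySem.Int.toChars) = [] ↔ l = [] := by
  cases l with
  | nil => simp [PySem.Chars.join_nil]
  | cons a t =>
    cases t with
    | nil =>
      simp only [List.map, PySem.Chars.join_singleton]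
      simp [pv_toChars_ne_nil a]
    | cons b u =>
      rw [List.map, List.map, PySem.Chars.join_cons_cons]
      simp [pv_toChars_ne_nil a]

lemma pv_F_lt_len (comps : List (List Char)) (fourth : Option Int) (extra : List Char)
    (i : Nat) (h : i < comps.length ∨ i < 3) (hi4 : i < 4) :
    i < (pvF comps fourth extra).length := by
  unfold pvF
  split_ifs with h4 <;>
    simp only [List.length_take, List.length_map, List.length_append,
      List.length_replicate] <;> omega

lemma pv_F_getElem_comp (comps : List (List Char)) (fourth : Option Int) (extra : List Char)
    (i : Nat) (hc : i < comps.length)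
    (h : i < (pvF comps fourth extra).length) :
    (pvF comps fourth extra)[i]'h = (PySem.Int.ofChars? (comps[i]'hc)).getD 0 := by
  unfold pvF at h ⊢
  split_ifs at h ⊢ with h4
  · rw [List.getElem_take, List.getElem_map]
  · rw [List.getElem_append_left (by
        simp only [List.length_append, List.length_map, List.length_replicate]; omega),
      List.getElem_append_left (by simpa using hc), List.getElem_map]

lemma pv_F_getElem_pad (comps : List (List Char)) (fourth : Option Int) (extra : List Char)
    (i : Nat) (hc : comps.length ≤ i) (h3 : i < 3)
    (h : i < (pvF comps fourth extra).length) :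
    (pvF comps fourth extra)[i]'h = 0 := by
  unfold pvF at h ⊢
  split_ifs at h ⊢ with hf
  · omega
  · rw [List.getElem_append_left (by
        simp only [List.length_append, List.length_map, List.length_replicate]; omega),
      List.getElem_append_right (by simp only [List.length_map]; omega)]
    simp

lemma pv_F_drop3 (comps : List (List Char)) (fourth : Option Int) (extra : List Char)
    (hn : comps.length ≤ 3) :
    (pvF comps fourth extra).drop 3 = pvFourth fourth extra := by
  unfold pvF
  rw [if_neg (by omega)]
  have hlen : ((comps.map (fun c => (PySem.Int.ofChars? c).getD 0)) ++
      List.replicate (3 - comps.length) (0:Int)).length = 3 := by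
    simp only [List.length_append, List.length_map, List.length_replicate]; omega
  exact List.drop_left' hlen

-- B's renderer emits exactly the closed-form list, dot-joined, from any start field i ≤ 4
lemma pv_render_eq (comps : List (List Char)) (fourth : Option Int) (extra : List Char) :
    ∀ (k i : Nat), i + k = 4 →
    pvRender comps i fourth extra =
      PySem.Chars.join ['.'] (((pvF comps fourth extra).drop i).map PySem.Int.toChars) := by
  intro k
  induction k with
  | zero =>
    intro i hi
    have h4 : i = 4 := by omega
    subst h4
    rw [pvRender.eq_def, if_pos rfl,
      List.drop_eq_nil_of_le (pv_F_len comps fourth extra), List.map_nil, PySem.Chars.join_nil]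
  | succ k ih =>
    intro i hi
    have hlt : i < 4 := by omega
    have hne : ¬ i = 4 := by omega
    rw [pvRender.eq_def, if_neg hne]
    by_cases hc : i < comps.length
    · -- a parsed component field
      rw [dif_pos hc]
      have hiF : i < (pvF comps fourth extra).length :=
        pv_F_lt_len comps fourth extra i (Or.inl hc) hlt
      rw [List.drop_eq_getElem_cons hiF, pv_F_getElem_comp comps fourth extra i hc hiF]
      simp only []
      rw [ih (i+1) (by omega), List.map_cons]
      by_cases hdn : (pvF comps fourth extra).drop (i+1) = []
      · rw [hdn, List.map_nil, PySem.Chars.join_nil, if_pos rfl, PySem.Chars.join_singleton]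
      · have hjne : PySem.Chars.join ['.']
            (((pvF comps fourth extra).drop (i+1)).map PySem.Int.toChars) ≠ [] :=
          fun hj => hdn ((pv_join_nil_iff _).mp hj)
        rw [if_neg hjne]
        cases hdrop : (pvF comps fourth extra).drop (i+1) with
        | nil => exact absurd hdrop hdn
        | cons z w =>
          rw [List.map_cons, PySem.Chars.join_cons_cons]
          simp
    · rw [dif_neg hc]
      by_cases h3 : i < 3
      · -- a zero-pad field
        rw [dif_pos h3]
        have hiF : i < (pvF comps fourth extra).length :=
          pv_F_lt_len comps fourth extra i (Or.inr h3) hlt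
        rw [List.drop_eq_getElem_cons hiF,
          pv_F_getElem_pad comps fourth extra i (by omega) h3 hiF]
        simp only []
        rw [ih (i+1) (by omega), List.map_cons, show PySem.Int.toChars 0 = ['0'] from rfl]
        by_cases hdn : (pvF comps fourth extra).drop (i+1) = []
        · rw [hdn, List.map_nil, PySem.Chars.join_nil, if_pos rfl, PySem.Chars.join_singleton]
        · have hjne : PySem.Chars.join ['.']
              (((pvF comps fourth extra).drop (i+1)).map PySem.Int.toChars) ≠ [] :=
            fun hj => hdn ((pv_join_nil_iff _).mp hj)
          rw [if_neg hjne]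
          cases hdrop : (pvF comps fourth extra).drop (i+1) with
          | nil => exact absurd hdrop hdn
          | cons z w =>
            rw [List.map_cons, PySem.Chars.join_cons_cons]
            simp
      · -- the fourth slot: i = 3, components exhausted
        rw [dif_neg h3]
        have hi3 : i = 3 := by omega
        subst hi3
        rw [pv_F_drop3 comps fourth extra (by omega)]
        unfold pvFourth
        cases fourth with
        | some r => rw [List.map, List.map_nil, PySem.Chars.join_singleton]
        | none =>
          by_cases he : extra ≠ []
          · rw [if_pos he, if_pos he, List.map, List.map_nil, PySem.Chars.join_singleton]
          · rw [if_neg he, if_neg he, List.map_nil, PySem.Chars.join_nil]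

-- A's pipeline after padding/append/truncate, as the closed-form list
lemma pv_Alist (ns : List Int) (fl : List Int) (hfl : fl.length ≤ 1) :
    PySem.List.slice
      (if (pvPadWhile ns).length < 4 then pvPadWhile ns ++ fl else pvPadWhile ns)
      (some 0) (some 4) =
    (if 4 ≤ ns.length then ns.take 4
     else ns ++ List.replicate (3 - ns.length) 0 ++ fl) := by
  rw [pv_padWhile_eq]
  by_cases h4 : 4 ≤ ns.length
  · have h30 : 3 - ns.length = 0 := by omega
    rw [h30, List.replicate_zero, List.append_nil, if_neg (by omega), pv_slice_0_4, if_pos h4]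
  · have hlen : (ns ++ List.replicate (3 - ns.length) (0:Int)).length = 3 := by
      simp; omega
    rw [if_pos (by omega), pv_slice_0_4, if_neg h4,
      List.take_of_length_le (by simp only [List.length_append, hlen]; omega)]

-- the tail shared by both ports, once the plus-split and rc strip are aligned
lemma pv_tail_core (ver2 : String) (rc : Option Int) (extraC : List Char) (L : List Int)
    (hL : L = if (pvPadWhile (((PySem.Str.split? ver2 ".").getD []).map
          (fun v => (PySem.Int.ofStr? v).getD 0))).length < 4 then
        pvPadWhile (((PySem.Str.split? ver2 ".").getD []).map
          (fun v => (PySem.Int.ofStr? v).getD 0)) ++ pvFourth rc extraC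
      else pvPadWhile (((PySem.Str.split? ver2 ".").getD []).map
          (fun v => (PySem.Int.ofStr? v).getD 0))) :
    PySem.Str.join "." ((PySem.List.slice L (some 0) (some 4)).map PySem.Int.toStr) =
    String.ofList (pvRender ((PySem.Chars.split? ver2.toList ['.']).getD []) 0 rc extraC) := by
  subst hL
  set compsS : List String := (PySem.Str.split? ver2 ".").getD [] with hcompsS
  set compsC : List (List Char) := (PySem.Chars.split? ver2.toList ['.']).getD [] with hcompsC
  have hbridge : compsC = compsS.map String.toList := by
    rw [hcompsC, hcompsS, show (['.'] : List Char) = (("." : String)).toList from rfl,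
      ← PySem.Str.split?_map]
    cases PySem.Str.split? ver2 "." <;> simp
  have hns : compsC.map (fun c => (PySem.Int.ofChars? c).getD 0) =
      compsS.map (fun v => (PySem.Int.ofStr? v).getD 0) := by
    rw [hbridge, List.map_map]
    rfl
  rw [pv_Alist _ _ (pv_fourth_len rc extraC)]
  unfold PySem.Str.join
  refine congrArg String.ofList ?_
  rw [pv_render_eq compsC rc extraC 4 0 rfl, List.drop_zero,
    List.map_map, show (String.toList ∘ PySem.Int.toStr) = PySem.Int.toChars from
      funext fun n => PySem.Int.toList_toStr n]
  have hFF : (if 4 ≤ (compsS.map (fun v => (PySem.Int.ofStr? v).getD 0)).length then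
        (compsS.map (fun v => (PySem.Int.ofStr? v).getD 0)).take 4
      else compsS.map (fun v => (PySem.Int.ofStr? v).getD 0) ++
        List.replicate (3 - (compsS.map (fun v => (PySem.Int.ofStr? v).getD 0)).length) 0 ++
        pvFourth rc extraC) = pvF compsC rc extraC := by
    unfold pvF
    rw [hns, hbridge]
    simp only [List.length_map]
  rw [hFF]
  rfl

lemma pv_tail (ver2 : String) (rc : Option Int) (eOpt : Option String) :
    (let versions : List Int :=
      ((PySem.Str.split? ver2 ".").getD []).map (fun v => (PySem.Int.ofStr? v).getD 0)
    let versions := pvPadWhile versions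
    let versions :=
      if versions.length < 4 then
        match rc with
        | some r => versions ++ [r]
        | none =>
          match eOpt with
          | some e =>
            if e ≠ "" then
              versions ++ [(PySem.Int.ofStr? (((PySem.Str.split? e "-").getD []).headD "")).getD 0]
            else versions
          | none => versions
      else versions
    PySem.Str.join "." ((PySem.List.slice versions (some 0) (some 4)).map PySem.Int.toStr)) =
    String.ofList (pvRender ((PySem.Chars.split? ver2.toList ['.']).getD []) 0 rc
      ((eOpt.getD "").toList)) := by
  simp only []
  cases rc with
  | some r =>
    exact pv_tail_core ver2 (some r) ((eOpt.getD "").toList) _ (by simp [pvFourth])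
  | none =>
    cases eOpt with
    | none => exact pv_tail_core ver2 none (("" : String)).toList _ (by simp [pvFourth])
    | some e =>
      by_cases he : e = ""
      · subst he
        exact pv_tail_core ver2 none (("" : String)).toList _ (by simp [pvFourth])
      · have helne : e.toList ≠ [] := fun h0 => he (String.toList_inj.mp (by simpa using h0))
        refine pv_tail_core ver2 none e.toList _ ?_
        have hcommit :
            (PySem.Int.ofChars? (((PySem.Chars.split? e.toList ['-']).getD []).headD [])).getD 0 =
            (PySem.Int.ofStr? (((PySem.Str.split? e "-").getD []).headD "")).getD 0 := by
          rw [show (['-'] : List Char) = (("-" : String)).toList from rfl,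
            ← PySem.Str.split?_map]
          cases hsp : PySem.Str.split? e "-" with
          | none => rfl
          | some L =>
            cases L with
            | nil => rfl
            | cons p q => rfl
        have hf4 : pvFourth none e.toList =
            [(PySem.Int.ofStr? (((PySem.Str.split? e "-").getD []).headD "")).getD 0] := by
          unfold pvFourth
          rw [if_pos helne, hcommit]
        simp only []
        rw [hf4, if_pos he]

-- Chars-level form of A's rc digit int(version[-1:]) = B's int(core[-1])
lemma pv_rcval (c : List Char) (h : c ≠ []) :
    PySem.Int.ofChars? (PySem.Chars.slice c (some (-1)) none) =
      PySem.Int.ofChars? [(PySem.Chars.pyGet? c (-1)).getD ' '] := by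
  rw [PySem.Chars.slice_eq_listSlice, pv_slice_m1_none, pv_drop_last _ h,
    PySem.Chars.pyGet?_eq_listPyGet?, PySem.List.pyGet?_neg_one,
    List.getLast?_eq_some_getLast h]
  rfl

-- A's and B's rc tests agree (endswith on the dropLast ↔ the [-3:-1] slice)
lemma pv_guards_agree (x : String) :
    (PySem.Str.endswith (PySem.Str.slice x none (some (-1))) "rc" = true) ↔
      (PySem.Chars.slice x.toList (some (-3)) (some (-1)) = ['r', 'c']) := by
  rw [PySem.Str.endswith_eq, PySem.Str.slice_to_neg_one,
    show ("rc" : String).toList = ['r', 'c'] from rfl, PySem.Chars.endswith_iff,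
    PySem.Chars.slice_eq_listSlice]
  exact pv_rc_guard x.toList

lemma pv_guard_len (x : String)
    (h : PySem.Chars.slice x.toList (some (-3)) (some (-1)) = ['r', 'c']) :
    x.toList ≠ [] := by
  rw [PySem.Chars.slice_eq_listSlice, pv_slice_m3_m1] at h
  have := congrArg List.length h
  simp only [List.length_drop, List.length_dropLast, List.length_cons, List.length_nil] at this
  intro h0
  rw [h0] at this
  simp at this

lemma pv_main (version : String) :
    normalize_windows_version version = normalize_windows_version_alt version := by
  unfold normalize_windows_version normalize_windows_version_alt
  simp only []
  by_cases hp : '+' ∈ version.toList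
  · obtain ⟨x, y, hxy, hx, hy⟩ := pv_split_str version hp
    have hIs : PySem.Str.isIn "+" version = true := (pv_isIn_plus version).mpr hp
    rw [hIs, hxy, if_pos hp]
    simp only [if_true]
    rw [← hy, ← hx]
    by_cases hrc : PySem.Chars.slice x.toList (some (-3)) (some (-1)) = ['r', 'c']
    · rw [if_pos ((pv_guards_agree x).mpr hrc), if_pos hrc]
      simp only []
      have hrv : PySem.Int.ofStr? (PySem.Str.slice x (some (-1)) none) =
          PySem.Int.ofChars? [(PySem.Chars.pyGet? x.toList (-1)).getD ' '] := by
        rw [show PySem.Int.ofStr? (PySem.Str.slice x (some (-1)) none) =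
          PySem.Int.ofChars? (PySem.Str.slice x (some (-1)) none).toList from rfl,
          PySem.Str.toList_slice]
        exact pv_rcval x.toList (pv_guard_len x hrc)
      rw [hrv]
      have ht := pv_tail (PySem.Str.slice x none (some (-3)))
        (some ((PySem.Int.ofChars? [(PySem.Chars.pyGet? x.toList (-1)).getD ' ']).getD 0)) (some y)
      rw [PySem.Str.toList_slice] at ht
      exact ht
    · have hA : PySem.Str.endswith (PySem.Str.slice x none (some (-1))) "rc" = false := by
        rcases Bool.eq_false_or_eq_true
            (PySem.Str.endswith (PySem.Str.slice x none (some (-1))) "rc") with h | h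
        · exact absurd ((pv_guards_agree x).mp h) hrc
        · exact h
      rw [hA, if_neg hrc]
      simp only [Bool.false_eq_true, if_false]
      exact pv_tail x none (some y)
  · have hIs : PySem.Str.isIn "+" version = false := by
      rcases Bool.eq_false_or_eq_true (PySem.Str.isIn "+" version) with h | h
      · exact absurd ((pv_isIn_plus version).mp h) hp
      · exact h
    have htw : version.toList.takeWhile (· ≠ '+') = version.toList :=
      List.takeWhile_eq_self_iff.mpr (fun a ha => by
        simp only [decide_eq_true_eq, ne_eq]
        intro h0; subst h0; exact hp ha)
    rw [pv_split_str_no version hp, hIs, if_neg hp, htw]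
    simp only [Bool.false_eq_true, if_false]
    by_cases hrc : PySem.Chars.slice version.toList (some (-3)) (some (-1)) = ['r', 'c']
    · rw [if_pos ((pv_guards_agree version).mpr hrc), if_pos hrc]
      simp only []
      have hrv : PySem.Int.ofStr? (PySem.Str.slice version (some (-1)) none) =
          PySem.Int.ofChars? [(PySem.Chars.pyGet? version.toList (-1)).getD ' '] := by
        rw [show PySem.Int.ofStr? (PySem.Str.slice version (some (-1)) none) =
          PySem.Int.ofChars? (PySem.Str.slice version (some (-1)) none).toList from rfl,
          PySem.Str.toList_slice]
        exact pv_rcval version.toList (pv_guard_len version hrc)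
      rw [hrv]
      have ht := pv_tail (PySem.Str.slice version none (some (-3)))
        (some ((PySem.Int.ofChars? [(PySem.Chars.pyGet? version.toList (-1)).getD ' ']).getD 0)) none
      rw [PySem.Str.toList_slice] at ht
      exact ht
    · have hA : PySem.Str.endswith (PySem.Str.slice version none (some (-1))) "rc" = false := by
        rcases Bool.eq_false_or_eq_true
            (PySem.Str.endswith (PySem.Str.slice version none (some (-1))) "rc") with h | h
        · exact absurd ((pv_guards_agree version).mp h) hrc
        · exact h
      rw [hA, if_neg hrc]
      simp only [Bool.false_eq_true, if_false]
      exact pv_tail version none none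

-- ===== VERDICT (by name: the statement is the Claim_ definition above) =====
theorem normalize_windows_version_spec : Claim_equal_normalize_windows_version := by
  intro version _ _
  unfold Spec_normalize_windows_version
  exact pv_main version
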